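-- pv_equiv track=rewrite | github.com/Niema-Lab/AmpliPy | AmpliPy.py | find_overlapping_primers
-- ===== SOURCE A (Python) =====
-- from collections import deque
--
-- def find_overlapping_primers(ref_genome_length, primers, primer_pos_offset):
--     '''Find all primers that cover every position of the reference genome
--
--     Args:
--         ``ref_genome_length`` (``int``): Length of the reference genome
--
--         ``primers`` (``list`` of ``(int,int)``): List of primer indices, where each primer is represented as a ``(start,end)`` tuple. Note that this uses 0-based indices, ``start`` is **in**clusive, and ``end`` is **ex**clusive. For example, `(0,100)` is the 100-length window starting at index 0 and ending at index 99.
--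
--         ``primer_pos_offset`` (``int``): Primer position offset. Reads that occur at the specified offset positions relative to primer positions will also be trimmed
--
--     Returns:
--         ``list`` of ``int``: The minimum start position (inclusive) of all primers that cover each position of the reference genome
--
--         ``list`` of ``int``: The maximum end position (exclusive) of all primers that cover each position of the reference genome
--     '''
--     # set things up
--     min_primer_start = [None for _ in range(ref_genome_length)]
--     max_primer_end = [None for _ in range(ref_genome_length)]
--     num_primers = len(primers); curr_primers = deque(); i = 0 # i = current index of primers; primers[i] is the "current" (start,end) tuple
--
--     # compute overlapping primers for each position of the reference genome
--     for ref_pos in range(ref_genome_length):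
--         # remove primers that have now been passed
--         while len(curr_primers) != 0 and ref_pos >= (primers[curr_primers[0]][1] + primer_pos_offset):
--             curr_primers.popleft()
--
--         # add primers that have now been entered
--         while i < num_primers and ref_pos >= (primers[i][0] - primer_pos_offset):
--             curr_primers.append(i); i += 1
--
--         # the primers in curr_primers must span ref_pos
--         if len(curr_primers) != 0:
--             min_primer_start[ref_pos] = min(primers[i][0] for i in curr_primers)
--             max_primer_end[ref_pos] = max(primers[i][1] for i in curr_primers)
--         ref_pos += 1
--     return min_primer_start, max_primer_end
-- ===== SOURCE B (Python) =====
-- from collections import deque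
--
-- def find_overlapping_primers(ref_genome_length, primers, primer_pos_offset):
--     '''Same window semantics as A, but min/max maintained with monotonic deques: O(n + m) instead of scanning the whole window at every position.'''
--     n = len(primers)
--     min_primer_start = []; max_primer_end = []
--     lo = 0; hi = 0                 # current window of primer indices is [lo, hi)
--     dq_min = deque()               # indices with strictly increasing start values
--     dq_max = deque()               # indices with strictly decreasing end values
--     for ref_pos in range(ref_genome_length):
--         # slide the left edge: drop primers whose window has been passed
--         while lo < hi and ref_pos >= primers[lo][1] + primer_pos_offset:
--             if dq_min and dq_min[0] == lo:
--                 dq_min.popleft()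
--             if dq_max and dq_max[0] == lo:
--                 dq_max.popleft()
--             lo += 1
--         # slide the right edge: admit primers that have now been entered
--         while hi < n and ref_pos >= primers[hi][0] - primer_pos_offset:
--             s, e = primers[hi]
--             while dq_min and primers[dq_min[-1]][0] >= s:
--                 dq_min.pop()
--             dq_min.append(hi)
--             while dq_max and primers[dq_max[-1]][1] <= e:
--                 dq_max.pop()
--             dq_max.append(hi)
--             hi += 1
--         if lo < hi:
--             min_primer_start.append(primers[dq_min[0]][0])
--             max_primer_end.append(primers[dq_max[0]][1])
--         else:
--             min_primer_start.append(None)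
--             max_primer_end.append(None)
--     return min_primer_start, max_primer_end
-- ===== Notes on version B (the rewrite author's own statement) =====
-- stated objective: faster
-- what changed: Replaces A's per-position min/max scan over the whole deque of active primers with two monotonic deques maintained incrementally, so each primer index is pushed/popped O(1) times and the per-position scan disappears.
import Mathlib
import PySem

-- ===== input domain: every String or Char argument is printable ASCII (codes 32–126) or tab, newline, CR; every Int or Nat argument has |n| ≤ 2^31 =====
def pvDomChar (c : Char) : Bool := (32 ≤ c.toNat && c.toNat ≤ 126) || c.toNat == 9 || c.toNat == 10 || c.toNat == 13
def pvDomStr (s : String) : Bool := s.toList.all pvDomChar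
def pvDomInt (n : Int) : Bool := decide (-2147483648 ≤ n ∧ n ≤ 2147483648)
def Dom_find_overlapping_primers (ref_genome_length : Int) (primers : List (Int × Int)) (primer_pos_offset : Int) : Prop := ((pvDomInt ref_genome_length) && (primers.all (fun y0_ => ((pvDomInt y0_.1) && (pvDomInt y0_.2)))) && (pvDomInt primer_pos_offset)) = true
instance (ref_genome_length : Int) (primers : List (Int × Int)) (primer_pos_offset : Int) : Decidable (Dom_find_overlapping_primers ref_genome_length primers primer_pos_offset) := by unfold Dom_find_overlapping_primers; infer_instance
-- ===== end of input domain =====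

-- B replaces A's per-position min/max scan over the active-primer deque with two
-- monotonic deques (O(n+m) instead of O(n*m)); return values proved equal on all inputs.

-- ===== PORT A =====
-- primers[i] for an index i produced by the loops (always 0 ≤ i < len(primers) in Python)
def pvGetP (primers : List (Int × Int)) (i : Nat) : Int × Int := primers.getD i (0, 0)

-- min(...) / max(...) of a nonempty generator of ints (the [] case is unreachable in A)
def pyMinInt : List Int → Int
  | [] => 0
  | x :: xs => xs.foldl min x
def pyMaxInt : List Int → Int
  | [] => 0
  | x :: xs => xs.foldl max x

-- 'while len(curr_primers) != 0 and ref_pos >= primers[curr_primers[0]][1] + primer_pos_offset: popleft()'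
def fopA_drop (primers : List (Int × Int)) (off pos : Int) : List Nat → List Nat
  | [] => []
  | c :: cs => if pos ≥ (pvGetP primers c).2 + off then fopA_drop primers off pos cs else c :: cs

-- 'while i < num_primers and ref_pos >= primers[i][0] - primer_pos_offset: curr_primers.append(i); i += 1'
def fopA_add (primers : List (Int × Int)) (off pos : Int) (n i : Nat) (curr : List Nat) : Nat × List Nat :=
  if _h : i < n ∧ pos ≥ (pvGetP primers i).1 - off then
    fopA_add primers off pos n (i + 1) (curr ++ [i])
  else (i, curr)
termination_by n - i

def find_overlapping_primers (ref_genome_length : Int) (primers : List (Int × Int)) (primer_pos_offset : Int) : List (Option Int) × List (Option Int) :=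
  let n := primers.length
  let st := (List.range ref_genome_length.toNat).foldl
    (fun (acc : List Nat × Nat × List (Option Int) × List (Option Int)) (p : Nat) =>
      let pos : Int := (p : Int)
      let curr1 := fopA_drop primers primer_pos_offset pos acc.1
      let r := fopA_add primers primer_pos_offset pos n acc.2.1 curr1
      if r.2 ≠ [] then
        (r.2, r.1,
         acc.2.2.1 ++ [some (pyMinInt (r.2.map (fun c => (pvGetP primers c).1)))],
         acc.2.2.2 ++ [some (pyMaxInt (r.2.map (fun c => (pvGetP primers c).2)))])
      else (r.2, r.1, acc.2.2.1 ++ [none], acc.2.2.2 ++ [none]))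
    ([], 0, [], [])
  (st.2.2.1, st.2.2.2)

-- ===== PORT B =====
-- 'if dq and dq[0] == lo: dq.popleft()'
def fopB_front (lo : Nat) : List Nat → List Nat
  | [] => []
  | f :: r => if f = lo then r else f :: r

-- 'while dq and p(dq[-1]): dq.pop()'  (remove the maximal suffix of elements satisfying p)
def fopB_popBack (p : Nat → Bool) : List Nat → List Nat
  | [] => []
  | x :: xs =>
    match fopB_popBack p xs with
    | [] => if p x then [] else [x]
    | y :: ys => x :: y :: ys

-- B's left-edge loop: advance lo, keeping the deque fronts in the window
def fopB_drop (primers : List (Int × Int)) (off pos : Int) (lo hi : Nat) (dmin dmax : List Nat) : Nat × List Nat × List Nat :=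
  if _h : lo < hi ∧ pos ≥ (pvGetP primers lo).2 + off then
    fopB_drop primers off pos (lo + 1) hi (fopB_front lo dmin) (fopB_front lo dmax)
  else (lo, dmin, dmax)
termination_by hi - lo

-- B's right-edge loop: admit primer hi, pushing it onto both monotonic deques
def fopB_add (primers : List (Int × Int)) (off pos : Int) (n hi : Nat) (dmin dmax : List Nat) : Nat × List Nat × List Nat :=
  if _h : hi < n ∧ pos ≥ (pvGetP primers hi).1 - off then
    fopB_add primers off pos n (hi + 1)
      (fopB_popBack (fun d => decide ((pvGetP primers d).1 ≥ (pvGetP primers hi).1)) dmin ++ [hi])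
      (fopB_popBack (fun d => decide ((pvGetP primers d).2 ≤ (pvGetP primers hi).2)) dmax ++ [hi])
  else (hi, dmin, dmax)
termination_by n - hi

def find_overlapping_primers_alt (ref_genome_length : Int) (primers : List (Int × Int)) (primer_pos_offset : Int) : List (Option Int) × List (Option Int) :=
  let n := primers.length
  let st := (List.range ref_genome_length.toNat).foldl
    (fun (acc : Nat × Nat × List Nat × List Nat × List (Option Int) × List (Option Int)) (p : Nat) =>
      let pos : Int := (p : Int)
      let d := fopB_drop primers primer_pos_offset pos acc.1 acc.2.1 acc.2.2.1 acc.2.2.2.1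
      let a := fopB_add primers primer_pos_offset pos n acc.2.1 d.2.1 d.2.2
      if d.1 < a.1 then
        (d.1, a.1, a.2.1, a.2.2,
         acc.2.2.2.2.1 ++ [some (pvGetP primers (a.2.1.headD 0)).1],
         acc.2.2.2.2.2 ++ [some (pvGetP primers (a.2.2.headD 0)).2])
      else (d.1, a.1, a.2.1, a.2.2, acc.2.2.2.2.1 ++ [none], acc.2.2.2.2.2 ++ [none]))
    (0, 0, [], [], [], [])
  (st.2.2.2.2.1, st.2.2.2.2.2)

-- ===== PRECONDITION & SPEC =====
def Spec_find_overlapping_primers (ref_genome_length : Int) (primers : List (Int × Int)) (primer_pos_offset : Int) (out : List (Option Int) × List (Option Int)) : Prop := out = find_overlapping_primers_alt ref_genome_length primers primer_pos_offset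
instance (ref_genome_length : Int) (primers : List (Int × Int)) (primer_pos_offset : Int) (out : List (Option Int) × List (Option Int)) : Decidable (Spec_find_overlapping_primers ref_genome_length primers primer_pos_offset out) := by unfold Spec_find_overlapping_primers; infer_instance

-- ===== CLAIM (what is proved, stated in full; the proofs are below) =====
def Claim_equal_find_overlapping_primers : Prop := ∀ (ref_genome_length : Int) (primers : List (Int × Int)) (primer_pos_offset : Int), Dom_find_overlapping_primers ref_genome_length primers primer_pos_offset → Spec_find_overlapping_primers ref_genome_length primers primer_pos_offset (find_overlapping_primers ref_genome_length primers primer_pos_offset)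

-- ===== LEMMAS AND PROOFS =====

-- value functions: start, and NEGATED end (so both deques are "monotone-increasing min" deques)
def pvSt (primers : List (Int × Int)) (d : Nat) : Int := (pvGetP primers d).1
def pvNE (primers : List (Int × Int)) (d : Nat) : Int := -((pvGetP primers d).2)

-- the monotonic-deque invariant over window [lo, hi)
def DeqInv (f : Nat → Int) (lo hi : Nat) (dq : List Nat) : Prop :=
  dq.Pairwise (fun a b => a < b ∧ f a < f b) ∧
  (∀ d ∈ dq, lo ≤ d ∧ d < hi) ∧
  (∀ j, lo ≤ j → j < hi → ∃ d ∈ dq, j ≤ d ∧ f d ≤ f j)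

lemma deq_front_min {f : Nat → Int} {lo hi : Nat} {d0 : Nat} {ds : List Nat}
    (h : DeqInv f lo hi (d0 :: ds)) : ∀ x ∈ d0 :: ds, f d0 ≤ f x := by
  intro x hx
  rcases List.mem_cons.mp hx with rfl | hx
  · exact le_refl _
  · exact le_of_lt ((List.pairwise_cons.mp h.1).1 x hx).2

lemma foldl_min_eq {m : Int} :
    ∀ (xs : List Int) (a : Int), (a = m ∨ m ∈ xs) → m ≤ a → (∀ x ∈ xs, m ≤ x) →
      xs.foldl min a = m := by
  intro xs
  induction xs with
  | nil =>
    intro a h1 h2 _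
    rcases h1 with rfl | h1
    · rfl
    · exact absurd h1 (List.not_mem_nil)
  | cons x xs ih =>
    intro a h1 h2 h3
    have hmx : m ≤ x := h3 x (List.mem_cons_self)
    refine ih (min a x) ?_ (le_min h2 hmx) (fun y hy => h3 y (List.mem_cons_of_mem _ hy))
    rcases h1 with rfl | h1
    · exact Or.inl (min_eq_left hmx)
    · rcases List.mem_cons.mp h1 with rfl | h1
      · exact Or.inl (min_eq_right h2)
      · exact Or.inr h1

lemma pyMinInt_eq {xs : List Int} {m : Int} (hm : m ∈ xs) (hle : ∀ x ∈ xs, m ≤ x) :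
    pyMinInt xs = m := by
  cases xs with
  | nil => exact absurd hm (List.not_mem_nil)
  | cons x xs =>
    show xs.foldl min x = m
    refine foldl_min_eq xs x ?_ (hle x (List.mem_cons_self)) (fun y hy => hle y (List.mem_cons_of_mem _ hy))
    rcases List.mem_cons.mp hm with rfl | h
    · exact Or.inl rfl
    · exact Or.inr h

lemma foldl_max_eq {m : Int} :
    ∀ (xs : List Int) (a : Int), (a = m ∨ m ∈ xs) → a ≤ m → (∀ x ∈ xs, x ≤ m) →
      xs.foldl max a = m := by
  intro xs
  induction xs with
  | nil =>
    intro a h1 h2 _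
    rcases h1 with rfl | h1
    · rfl
    · exact absurd h1 (List.not_mem_nil)
  | cons x xs ih =>
    intro a h1 h2 h3
    have hmx : x ≤ m := h3 x (List.mem_cons_self)
    refine ih (max a x) ?_ (max_le h2 hmx) (fun y hy => h3 y (List.mem_cons_of_mem _ hy))
    rcases h1 with rfl | h1
    · exact Or.inl (max_eq_left hmx)
    · rcases List.mem_cons.mp h1 with rfl | h1
      · exact Or.inl (max_eq_right h2)
      · exact Or.inr h1

lemma pyMaxInt_eq {xs : List Int} {m : Int} (hm : m ∈ xs) (hle : ∀ x ∈ xs, x ≤ m) :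
    pyMaxInt xs = m := by
  cases xs with
  | nil => exact absurd hm (List.not_mem_nil)
  | cons x xs =>
    show xs.foldl max x = m
    refine foldl_max_eq xs x ?_ (hle x (List.mem_cons_self)) (fun y hy => hle y (List.mem_cons_of_mem _ hy))
    rcases List.mem_cons.mp hm with rfl | h
    · exact Or.inl rfl
    · exact Or.inr h

lemma front_step {f : Nat → Int} {lo hi : Nat} {dq : List Nat}
    (h : DeqInv f lo hi dq) : DeqInv f (lo + 1) hi (fopB_front lo dq) := by
  obtain ⟨hp, hmem, hcov⟩ := h
  cases dq with
  | nil =>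
    refine ⟨List.Pairwise.nil, by simp [fopB_front], fun j hj1 hj2 => ?_⟩
    obtain ⟨d, hd, _⟩ := hcov j (Nat.le_of_succ_le hj1) hj2
    exact absurd hd (List.not_mem_nil)
  | cons f0 r =>
    obtain ⟨hp1, hp2⟩ := List.pairwise_cons.mp hp
    by_cases hf0 : f0 = lo
    · subst hf0
      simp only [fopB_front, if_pos]
      refine ⟨hp2, fun d hd => ⟨(hp1 d hd).1, (hmem d (List.mem_cons_of_mem _ hd)).2⟩,
        fun j hj1 hj2 => ?_⟩
      obtain ⟨d, hd, hjd, hfd⟩ := hcov j (Nat.le_of_succ_le hj1) hj2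
      rcases List.mem_cons.mp hd with rfl | hd
      · omega
      · exact ⟨d, hd, hjd, hfd⟩
    · simp only [fopB_front, if_neg hf0]
      refine ⟨hp, fun d hd => ?_, fun j hj1 hj2 =>
        hcov j (Nat.le_of_succ_le hj1) hj2⟩
      rcases List.mem_cons.mp hd with rfl | hd
      · exact ⟨by have := (hmem d (List.mem_cons_self)).1; omega, (hmem d (List.mem_cons_self)).2⟩
      · have h1 := (hmem f0 (List.mem_cons_self)).1
        have h2 := (hp1 d hd).1
        exact ⟨by omega, (hmem d (List.mem_cons_of_mem _ hd)).2⟩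

lemma popBack_split (p : Nat → Bool) (dq : List Nat) :
    ∃ rest, dq = fopB_popBack p dq ++ rest ∧ ∀ y ∈ rest, p y = true := by
  induction dq with
  | nil => exact ⟨[], rfl, by simp⟩
  | cons x xs ih =>
    obtain ⟨rest, hxs, hrest⟩ := ih
    cases hr : fopB_popBack p xs with
    | nil =>
      have hx : fopB_popBack p (x :: xs) = if p x = true then [] else [x] := by
        simp [fopB_popBack, hr]
      rw [hr] at hxs
      by_cases hpx : p x = true
      · refine ⟨x :: xs, by rw [hx, if_pos hpx]; rfl, fun y hy => ?_⟩
        rcases List.mem_cons.mp hy with rfl | hy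
        · exact hpx
        · exact hrest y (by simpa [hxs] using hy)
      · exact ⟨rest, by rw [hx, if_neg hpx]; simp [hxs], fun y hy => hrest y hy⟩
    | cons y ys =>
      have hx : fopB_popBack p (x :: xs) = x :: y :: ys := by
        simp [fopB_popBack, hr]
      rw [hr] at hxs
      exact ⟨rest, by rw [hx, hxs]; rfl, hrest⟩

lemma popBack_sublist (p : Nat → Bool) (dq : List Nat) : List.Sublist (fopB_popBack p dq) dq := by
  obtain ⟨rest, hsplit, _⟩ := popBack_split p dq
  conv_rhs => rw [hsplit]
  exact List.sublist_append_left _ _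

lemma popBack_lt {f : Nat → Int} {v : Int} {dq : List Nat}
    (hp : dq.Pairwise (fun a b => f a < f b)) :
    ∀ x ∈ fopB_popBack (fun d => decide (v ≤ f d)) dq, f x < v := by
  induction dq with
  | nil => intro x hx; exact absurd hx (List.not_mem_nil)
  | cons x xs ih =>
    obtain ⟨hp1, hp2⟩ := List.pairwise_cons.mp hp
    intro z hz
    cases hr : fopB_popBack (fun d => decide (v ≤ f d)) xs with
    | nil =>
      simp only [fopB_popBack, hr] at hz
      by_cases hpx : v ≤ f x
      · simp [hpx] at hz
      · simp [hpx] at hz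
        subst hz; omega
    | cons y ys =>
      simp only [fopB_popBack, hr] at hz
      rcases List.mem_cons.mp hz with rfl | hz
      · have hy : y ∈ fopB_popBack (fun d => decide (v ≤ f d)) xs := by rw [hr]; exact List.mem_cons_self
        have hyx : y ∈ xs := (popBack_sublist _ xs).mem hy
        have h1 : f z < f y := hp1 y hyx
        have h2 : f y < v := ih hp2 y hy
        omega
      · exact ih hp2 z (by rw [hr]; exact hz)

lemma push_step {f : Nat → Int} {lo hi : Nat} {dq : List Nat}
    (h : DeqInv f lo hi dq) (hlh : lo ≤ hi) :
    DeqInv f lo (hi + 1) (fopB_popBack (fun d => decide (f hi ≤ f d)) dq ++ [hi]) := by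
  obtain ⟨hp, hmem, hcov⟩ := h
  obtain ⟨rest, hsplit, hrest⟩ := popBack_split (fun d => decide (f hi ≤ f d)) dq
  have hsub : List.Sublist (fopB_popBack (fun d => decide (f hi ≤ f d)) dq) dq := popBack_sublist _ dq
  have hlt : ∀ x ∈ fopB_popBack (fun d => decide (f hi ≤ f d)) dq, f x < f hi :=
    popBack_lt (hp.imp fun hab => hab.2)
  refine ⟨?_, ?_, ?_⟩
  · rw [List.pairwise_append]
    refine ⟨hp.sublist hsub, List.pairwise_singleton _ _, fun a ha b hb => ?_⟩
    rcases List.mem_singleton.mp hb with rfl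
    exact ⟨(hmem a (hsub.mem ha)).2, hlt a ha⟩
  · intro d hd
    rcases List.mem_append.mp hd with hd | hd
    · have := hmem d (hsub.mem hd); omega
    · rcases List.mem_singleton.mp hd with rfl; omega
  · intro j hj1 hj2
    rcases Nat.lt_succ_iff_lt_or_eq.mp hj2 with hj | rfl
    · obtain ⟨d, hd, hjd, hfd⟩ := hcov j hj1 hj
      rw [hsplit] at hd
      rcases List.mem_append.mp hd with hd | hd
      · exact ⟨d, List.mem_append_left _ hd, hjd, hfd⟩
      · have : f hi ≤ f d := of_decide_eq_true (hrest d hd)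
        exact ⟨hi, List.mem_append_right _ (List.mem_singleton.mpr rfl), le_of_lt hj,
          le_trans this hfd⟩
    · exact ⟨j, List.mem_append_right _ (List.mem_singleton.mpr rfl), le_refl _, le_refl _⟩

lemma drop_sync (primers : List (Int × Int)) (off pos : Int) :
    ∀ (k lo : Nat) (dmin dmax : List Nat),
      DeqInv (pvSt primers) lo (lo + k) dmin →
      DeqInv (pvNE primers) lo (lo + k) dmax →
      fopA_drop primers off pos (List.range' lo k) =
        List.range' (fopB_drop primers off pos lo (lo + k) dmin dmax).1
          (lo + k - (fopB_drop primers off pos lo (lo + k) dmin dmax).1) ∧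
      lo ≤ (fopB_drop primers off pos lo (lo + k) dmin dmax).1 ∧
      (fopB_drop primers off pos lo (lo + k) dmin dmax).1 ≤ lo + k ∧
      DeqInv (pvSt primers) (fopB_drop primers off pos lo (lo + k) dmin dmax).1 (lo + k)
        (fopB_drop primers off pos lo (lo + k) dmin dmax).2.1 ∧
      DeqInv (pvNE primers) (fopB_drop primers off pos lo (lo + k) dmin dmax).1 (lo + k)
        (fopB_drop primers off pos lo (lo + k) dmin dmax).2.2 := by
  intro k
  induction k with
  | zero =>
    intro lo dmin dmax h1 h2
    rw [fopB_drop, dif_neg (by omega)]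
    exact ⟨by simp [fopA_drop], le_refl lo, by omega, h1, h2⟩
  | succ k ih =>
    intro lo dmin dmax h1 h2
    by_cases hc : pos ≥ (pvGetP primers lo).2 + off
    · rw [fopB_drop, dif_pos ⟨by omega, hc⟩]
      have harith : lo + (k + 1) = (lo + 1) + k := by omega
      rw [harith] at h1 h2 ⊢
      rw [List.range'_succ]
      simp only [fopA_drop, if_pos hc]
      obtain ⟨g1, g2, g3, g4, g5⟩ := ih (lo + 1) _ _ (front_step h1) (front_step h2)
      exact ⟨g1, by omega, g3, g4, g5⟩
    · rw [fopB_drop, dif_neg (by intro hcon; exact hc hcon.2)]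
      refine ⟨?_, le_refl lo, by omega, h1, h2⟩
      have harith : lo + (k + 1) - lo = k + 1 := by omega
      rw [harith, List.range'_succ]
      simp [fopA_drop, hc]

lemma add_sync_aux (primers : List (Int × Int)) (off pos : Int) (n : Nat) :
    ∀ (fuel : Nat) (hi lo : Nat) (dmin dmax : List Nat), n - hi ≤ fuel → lo ≤ hi →
      DeqInv (pvSt primers) lo hi dmin →
      DeqInv (pvNE primers) lo hi dmax →
      fopA_add primers off pos n hi (List.range' lo (hi - lo)) =
        ((fopB_add primers off pos n hi dmin dmax).1,
         List.range' lo ((fopB_add primers off pos n hi dmin dmax).1 - lo)) ∧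
      hi ≤ (fopB_add primers off pos n hi dmin dmax).1 ∧
      DeqInv (pvSt primers) lo (fopB_add primers off pos n hi dmin dmax).1
        (fopB_add primers off pos n hi dmin dmax).2.1 ∧
      DeqInv (pvNE primers) lo (fopB_add primers off pos n hi dmin dmax).1
        (fopB_add primers off pos n hi dmin dmax).2.2 := by
  intro fuel
  induction fuel with
  | zero =>
    intro hi lo dmin dmax hfuel hlh h1 h2
    have hnc : ¬ (hi < n ∧ pos ≥ (pvGetP primers hi).1 - off) := fun hcon => by omega
    rw [fopA_add, dif_neg hnc, fopB_add, dif_neg hnc]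
    exact ⟨rfl, le_refl hi, h1, h2⟩
  | succ fuel ih =>
    intro hi lo dmin dmax hfuel hlh h1 h2
    by_cases hc : hi < n ∧ pos ≥ (pvGetP primers hi).1 - off
    · rw [fopA_add, dif_pos hc, fopB_add, dif_pos hc]
      have hminp : (fun d => decide ((pvGetP primers d).1 ≥ (pvGetP primers hi).1)) =
          (fun d => decide (pvSt primers hi ≤ pvSt primers d)) :=
        funext fun d => by rw [decide_eq_decide]; unfold pvSt; omega
      have hmaxp : (fun d => decide ((pvGetP primers d).2 ≤ (pvGetP primers hi).2)) =
          (fun d => decide (pvNE primers hi ≤ pvNE primers d)) :=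
        funext fun d => by rw [decide_eq_decide]; unfold pvNE; omega
      rw [hminp, hmaxp]
      have hconcat : List.range' lo (hi - lo) ++ [hi] = List.range' lo (hi + 1 - lo) := by
        have h3 : hi + 1 - lo = (hi - lo) + 1 := by omega
        have h4 : hi = lo + (hi - lo) := by omega
        rw [h3, List.range'_1_concat, ← h4]
      rw [hconcat]
      obtain ⟨g1, g2, g3, g4⟩ := ih (hi + 1) lo
        (fopB_popBack (fun d => decide (pvSt primers hi ≤ pvSt primers d)) dmin ++ [hi])
        (fopB_popBack (fun d => decide (pvNE primers hi ≤ pvNE primers d)) dmax ++ [hi])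
        (by omega) (by omega) (push_step h1 hlh) (push_step h2 hlh)
      exact ⟨g1, by omega, g3, g4⟩
    · rw [fopA_add, dif_neg hc, fopB_add, dif_neg hc]
      exact ⟨rfl, le_refl hi, h1, h2⟩

lemma add_sync (primers : List (Int × Int)) (off pos : Int) (n : Nat) :
    ∀ (hi lo : Nat) (dmin dmax : List Nat), lo ≤ hi →
      DeqInv (pvSt primers) lo hi dmin →
      DeqInv (pvNE primers) lo hi dmax →
      fopA_add primers off pos n hi (List.range' lo (hi - lo)) =
        ((fopB_add primers off pos n hi dmin dmax).1,
         List.range' lo ((fopB_add primers off pos n hi dmin dmax).1 - lo)) ∧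
      hi ≤ (fopB_add primers off pos n hi dmin dmax).1 ∧
      DeqInv (pvSt primers) lo (fopB_add primers off pos n hi dmin dmax).1
        (fopB_add primers off pos n hi dmin dmax).2.1 ∧
      DeqInv (pvNE primers) lo (fopB_add primers off pos n hi dmin dmax).1
        (fopB_add primers off pos n hi dmin dmax).2.2 :=
  fun hi lo dmin dmax => add_sync_aux primers off pos n (n - hi) hi lo dmin dmax (le_refl _)

lemma deq_min_val {primers : List (Int × Int)} {lo hi : Nat} {dq : List Nat}
    (h : DeqInv (pvSt primers) lo hi dq) (hlt : lo < hi) :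
    pyMinInt ((List.range' lo (hi - lo)).map (fun c => (pvGetP primers c).1)) =
      (pvGetP primers (dq.headD 0)).1 := by
  obtain ⟨d, hd, _, _⟩ := h.2.2 lo (le_refl lo) hlt
  cases dq with
  | nil => exact absurd hd (List.not_mem_nil)
  | cons d0 ds =>
    simp only [List.headD_cons]
    have hd0 := h.2.1 d0 (List.mem_cons_self)
    refine pyMinInt_eq (List.mem_map.mpr ⟨d0, List.mem_range'_1.mpr ⟨hd0.1, by omega⟩, rfl⟩) ?_
    intro x hx
    obtain ⟨j, hj, rfl⟩ := List.mem_map.mp hx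
    obtain ⟨hj1, hj2⟩ := List.mem_range'_1.mp hj
    obtain ⟨d', hd', _, hfd'⟩ := h.2.2 j hj1 (by omega)
    have hfront := deq_front_min h d' hd'
    have : pvSt primers d0 ≤ pvSt primers j := le_trans hfront hfd'
    simpa [pvSt] using this

lemma deq_max_val {primers : List (Int × Int)} {lo hi : Nat} {dq : List Nat}
    (h : DeqInv (pvNE primers) lo hi dq) (hlt : lo < hi) :
    pyMaxInt ((List.range' lo (hi - lo)).map (fun c => (pvGetP primers c).2)) =
      (pvGetP primers (dq.headD 0)).2 := by
  obtain ⟨d, hd, _, _⟩ := h.2.2 lo (le_refl lo) hlt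
  cases dq with
  | nil => exact absurd hd (List.not_mem_nil)
  | cons d0 ds =>
    simp only [List.headD_cons]
    have hd0 := h.2.1 d0 (List.mem_cons_self)
    refine pyMaxInt_eq (List.mem_map.mpr ⟨d0, List.mem_range'_1.mpr ⟨hd0.1, by omega⟩, rfl⟩) ?_
    intro x hx
    obtain ⟨j, hj, rfl⟩ := List.mem_map.mp hx
    obtain ⟨hj1, hj2⟩ := List.mem_range'_1.mp hj
    obtain ⟨d', hd', _, hfd'⟩ := h.2.2 j hj1 (by omega)
    have hfront := deq_front_min h d' hd'
    have : pvNE primers d0 ≤ pvNE primers j := le_trans hfront hfd'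
    unfold pvNE at this
    omega

-- the coupling between A's state and B's state
def StRel (primers : List (Int × Int))
    (a : List Nat × Nat × List (Option Int) × List (Option Int))
    (b : Nat × Nat × List Nat × List Nat × List (Option Int) × List (Option Int)) : Prop :=
  b.1 ≤ b.2.1 ∧
  a.1 = List.range' b.1 (b.2.1 - b.1) ∧
  a.2.1 = b.2.1 ∧
  DeqInv (pvSt primers) b.1 b.2.1 b.2.2.1 ∧
  DeqInv (pvNE primers) b.1 b.2.1 b.2.2.2.1 ∧
  a.2.2.1 = b.2.2.2.2.1 ∧
  a.2.2.2 = b.2.2.2.2.2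

lemma foldl_rel {α β γ : Type} (R : α → β → Prop) (f : α → γ → α) (g : β → γ → β)
    (h : ∀ a b c, R a b → R (f a c) (g b c)) :
    ∀ (l : List γ) (a : α) (b : β), R a b → R (l.foldl f a) (l.foldl g b) := by
  intro l
  induction l with
  | nil => intro a b hab; exact hab
  | cons x xs ih => intro a b hab; exact ih _ _ (h a b x hab)

lemma step_rel (primers : List (Int × Int)) (off : Int) (p : Nat)
    (a : List Nat × Nat × List (Option Int) × List (Option Int))
    (b : Nat × Nat × List Nat × List Nat × List (Option Int) × List (Option Int))
    (hab : StRel primers a b) :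
    StRel primers
      (let pos : Int := (p : Int)
       let curr1 := fopA_drop primers off pos a.1
       let r := fopA_add primers off pos primers.length a.2.1 curr1
       if r.2 ≠ [] then
         (r.2, r.1,
          a.2.2.1 ++ [some (pyMinInt (r.2.map (fun c => (pvGetP primers c).1)))],
          a.2.2.2 ++ [some (pyMaxInt (r.2.map (fun c => (pvGetP primers c).2)))])
       else (r.2, r.1, a.2.2.1 ++ [none], a.2.2.2 ++ [none]))
      (let pos : Int := (p : Int)
       let d := fopB_drop primers off pos b.1 b.2.1 b.2.2.1 b.2.2.2.1
       let aa := fopB_add primers off pos primers.length b.2.1 d.2.1 d.2.2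
       if d.1 < aa.1 then
         (d.1, aa.1, aa.2.1, aa.2.2,
          b.2.2.2.2.1 ++ [some (pvGetP primers (aa.2.1.headD 0)).1],
          b.2.2.2.2.2 ++ [some (pvGetP primers (aa.2.2.headD 0)).2])
       else (d.1, aa.1, aa.2.1, aa.2.2, b.2.2.2.2.1 ++ [none], b.2.2.2.2.2 ++ [none])) := by
  obtain ⟨hlh, hcurr, hieq, hmin, hmax, hout1, hout2⟩ := hab
  dsimp only
  have harith : b.1 + (b.2.1 - b.1) = b.2.1 := by omega
  have hd := drop_sync primers off (p : Int) (b.2.1 - b.1) b.1 b.2.2.1 b.2.2.2.1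
    (by rw [harith]; exact hmin) (by rw [harith]; exact hmax)
  rw [harith] at hd
  obtain ⟨hd1, hd2, hd3, hd4, hd5⟩ := hd
  obtain ⟨ha1, ha2, ha3, ha4⟩ := add_sync primers off (p : Int) primers.length b.2.1
    (fopB_drop primers off (p : Int) b.1 b.2.1 b.2.2.1 b.2.2.2.1).1
    (fopB_drop primers off (p : Int) b.1 b.2.1 b.2.2.1 b.2.2.2.1).2.1
    (fopB_drop primers off (p : Int) b.1 b.2.1 b.2.2.1 b.2.2.2.1).2.2 hd3 hd4 hd5
  rw [hcurr, hieq, hd1, ha1]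
  by_cases hlt : (fopB_drop primers off (p : Int) b.1 b.2.1 b.2.2.1 b.2.2.2.1).1 <
      (fopB_add primers off (p : Int) primers.length b.2.1
        (fopB_drop primers off (p : Int) b.1 b.2.1 b.2.2.1 b.2.2.2.1).2.1
        (fopB_drop primers off (p : Int) b.1 b.2.1 b.2.2.1 b.2.2.2.1).2.2).1
  · rw [if_pos (by simp [List.range'_eq_nil_iff]; omega), if_pos hlt]
    refine ⟨Nat.le_of_lt hlt, rfl, rfl, ha3, ha4, ?_, ?_⟩
    · rw [hout1, deq_min_val ha3 hlt]
    · rw [hout2, deq_max_val ha4 hlt]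
  · rw [if_neg (by simp [List.range'_eq_nil_iff]; omega), if_neg hlt]
    exact ⟨le_trans hd3 ha2, rfl, rfl, ha3, ha4, by rw [hout1], by rw [hout2]⟩

-- ===== VERDICT (by name: the statement is the Claim_ definition above) =====
theorem find_overlapping_primers_spec : Claim_equal_find_overlapping_primers := by
  intro L primers off _
  unfold Spec_find_overlapping_primers find_overlapping_primers find_overlapping_primers_alt
  have h := foldl_rel (StRel primers) _ _
    (fun a b c hab => step_rel primers off c a b hab)
    (List.range L.toNat) ([], 0, [], []) (0, 0, [], [], [], [])
    (by
      refine ⟨le_refl 0, rfl, rfl, ?_, ?_, rfl, rfl⟩ <;>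
        exact ⟨List.Pairwise.nil, by simp, fun j h1 h2 => absurd (lt_of_le_of_lt h1 h2) (lt_irrefl _)⟩)
  exact congrArg₂ Prod.mk h.2.2.2.2.2.1 h.2.2.2.2.2.2
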